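-- pv_equiv track=rewrite | github.com/luckboy/espact | espact/filters.py | ymlsqe
-- ===== SOURCE A (Python) =====
-- def ymlsqe(string):
--     new_string = ""
--     for c in string:
--         if c == "'":
--             new_string += "''"
--         else:
--             new_string += c
--     return new_string
-- ===== SOURCE B (Python) =====
-- def ymlsqe(string):
--     return string.replace("'", "''")
-- ===== Notes on version B (the rewrite author's own statement) =====
-- stated objective: idiomatic
-- what changed: The explicit per-character loop with a string accumulator is replaced by a single str.replace call that substitutes the doubled quote in one library pass.
import Mathlib
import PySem

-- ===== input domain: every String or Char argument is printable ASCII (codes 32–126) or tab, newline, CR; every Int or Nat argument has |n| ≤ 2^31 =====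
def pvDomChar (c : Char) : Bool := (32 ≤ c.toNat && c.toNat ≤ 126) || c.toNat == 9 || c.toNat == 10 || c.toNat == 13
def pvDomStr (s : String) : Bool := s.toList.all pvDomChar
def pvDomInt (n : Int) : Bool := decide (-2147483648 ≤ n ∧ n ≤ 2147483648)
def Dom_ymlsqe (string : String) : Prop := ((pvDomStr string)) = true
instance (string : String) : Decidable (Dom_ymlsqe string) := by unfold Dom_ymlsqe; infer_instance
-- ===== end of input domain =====

-- B replaces A's per-character loop and accumulator with one str.replace call (idiomatic).

-- ===== PORT A =====
-- the loop's string accumulator is kept as a List Char and packed into a String at the end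
def ymlsqe (string : String) : String :=
  String.ofList (string.toList.foldl
    (fun new_string c => if c = '\'' then new_string ++ ['\'', '\''] else new_string ++ [c]) [])

-- ===== PORT B =====
def ymlsqe_alt (string : String) : String :=
  PySem.Str.replace string "'" "''"

-- ===== PRECONDITION & SPEC =====
def Spec_ymlsqe (string : String) (out : String) : Prop := out = ymlsqe_alt string
instance (string : String) (out : String) : Decidable (Spec_ymlsqe string out) := by unfold Spec_ymlsqe; infer_instance

-- ===== CLAIM (what is proved, stated in full; the proofs are below) =====
def Claim_equal_ymlsqe : Prop := ∀ (string : String), Dom_ymlsqe string → Spec_ymlsqe string (ymlsqe string)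

-- ===== LEMMAS AND PROOFS =====

-- one escaped character
def pvEsc (c : Char) : List Char := if c = '\'' then ['\'', '\''] else [c]

theorem pv_foldl_esc (l acc : List Char) :
    l.foldl (fun new_string c => if c = '\'' then new_string ++ ['\'', '\''] else new_string ++ [c]) acc
      = acc ++ l.flatMap pvEsc := by
  induction l generalizing acc with
  | nil => simp
  | cons c t ih =>
    simp only [List.foldl_cons, List.flatMap_cons, ih, pvEsc]
    by_cases h : c = '\'' <;> simp [h]

theorem pv_go_esc (l : List Char) (fuel : Nat) (acc : List Char) (h : l.length ≤ fuel) :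
    PySem.Chars.replace.go ['\''] ['\'', '\''] fuel l acc = acc.reverse ++ l.flatMap pvEsc := by
  induction l generalizing fuel acc with
  | nil => cases fuel <;> simp [PySem.Chars.replace.go]
  | cons c t ih =>
    cases fuel with
    | zero => simp at h
    | succ f =>
      simp only [PySem.Chars.replace.go]
      by_cases hc : c = '\''
      · subst hc
        have : List.isPrefixOf ['\''] ('\'' :: t) = true := by simp [List.isPrefixOf]
        rw [if_pos this]
        simp only [List.length_cons, List.length_nil, List.drop_succ_cons, List.drop_zero,
          Nat.zero_add]
        rw [ih f _ (Nat.le_of_succ_le_succ h)]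
        simp [pvEsc]
      · have : List.isPrefixOf ['\''] (c :: t) = false := by
          simp [List.isPrefixOf]; exact fun hh => (hc hh.symm).elim
        rw [if_neg (by simp [this])]
        rw [ih f _ (Nat.le_of_succ_le_succ h)]
        simp [pvEsc, hc]

theorem pv_toList_eq (string : String) : (ymlsqe string).toList = (ymlsqe_alt string).toList := by
  unfold ymlsqe ymlsqe_alt
  rw [PySem.Str.toList_replace]
  show (String.ofList _).toList = PySem.Chars.replace string.toList "'".toList "''".toList
  rw [PySem.Chars.replace]
  simp only [List.isEmpty_iff]
  rw [if_neg (by simp)]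
  have h1 : "'".toList = ['\''] := rfl
  have h2 : "''".toList = ['\'', '\''] := rfl
  rw [h1, h2, pv_go_esc _ _ _ (le_refl _)]
  simp [pv_foldl_esc]

-- ===== VERDICT (by name: the statement is the Claim_ definition above) =====
theorem ymlsqe_spec : Claim_equal_ymlsqe := by
  intro string _
  unfold Spec_ymlsqe
  have h := pv_toList_eq string
  exact String.toList_injective h
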